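-- pv_equiv track=rewrite | github.com/kcx2366425574/LeetCode | leetcode/2053_kth_distinct.py | kthDistinct1
-- ===== SOURCE A (Python) =====
-- from collections import defaultdict, Counter
--
-- def kthDistinct1(arr: list[str], k: int) -> str:
--
--     nums_count = Counter(arr)
--
--     for a in arr:
--         if nums_count[a] == 1:
--             k -= 1
--             if k == 0:
--                 return a
--     return ""
-- ===== SOURCE B (Python) =====
-- def kthDistinct1(arr: list[str], k: int) -> str:
--     # Single pass, no counting: keep an ordered dict of strings seen exactly
--     # once so far and a set of strings seen more than once; a second sighting
--     # moves a string from `once` to `dup` for good.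
--     once = {}
--     dup = set()
--     for a in arr:
--         if a in dup:
--             continue
--         if a in once:
--             del once[a]
--             dup.add(a)
--         else:
--             once[a] = None
--     distinct = list(once)
--     return distinct[k - 1] if 1 <= k <= len(distinct) else ""
-- ===== Notes on version B (the rewrite author's own statement) =====
-- stated objective: alternative
-- what changed: B never counts: a single pass maintains an ordered dict of strings seen exactly once and a set of strings seen twice or more (a second sighting permanently evicts the string), then answers by positional indexing into the surviving keys with a bounds guard, instead of A's Counter followed by a second scan of the full array with a k decrement.
import Mathlib
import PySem

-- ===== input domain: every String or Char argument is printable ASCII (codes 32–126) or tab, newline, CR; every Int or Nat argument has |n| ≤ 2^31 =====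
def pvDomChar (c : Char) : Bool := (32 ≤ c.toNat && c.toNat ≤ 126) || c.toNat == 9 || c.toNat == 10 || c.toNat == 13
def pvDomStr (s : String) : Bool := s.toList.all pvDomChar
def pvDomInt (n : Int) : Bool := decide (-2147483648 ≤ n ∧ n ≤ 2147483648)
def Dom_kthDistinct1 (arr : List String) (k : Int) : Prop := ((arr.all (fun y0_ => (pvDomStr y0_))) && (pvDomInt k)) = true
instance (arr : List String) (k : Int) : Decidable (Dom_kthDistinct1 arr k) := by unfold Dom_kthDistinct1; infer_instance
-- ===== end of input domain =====

-- B replaces A's Counter-then-rescan with a single counting-free pass (once/dup eviction); objective: alternative decomposition, same cost.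

-- ===== PORT A =====
-- A: Counter(arr), then scan arr left to right, decrementing k at each string of count 1;
-- return it when k hits 0, else "".
def kthDistinct1Loop (c : PySem.Dict String Int) : List String → Int → String
  | [], _ => ""
  | a :: rest, k =>
    if c.getD a 0 == 1 then
      if k - 1 = 0 then a else kthDistinct1Loop c rest (k - 1)
    else kthDistinct1Loop c rest k

def kthDistinct1 (arr : List String) (k : Int) : String :=
  kthDistinct1Loop (PySem.Dict.counter arr) arr k

-- ===== PORT B =====
-- B: one pass; `once` is an ordered dict of strings seen exactly once so far,
-- `dup` a set of strings seen at least twice; a second sighting moves the string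
-- from once to dup for good. Answer = positional index into once's keys, guarded.
def kthAltStep (s : PySem.Dict String (Option Unit) × PySem.Set String) (a : String) :
    PySem.Dict String (Option Unit) × PySem.Set String :=
  if PySem.Set.contains s.2 a then s
  else if s.1.contains a then (s.1.erase a, PySem.Set.add s.2 a)
  else (s.1.insert a none, s.2)

def kthDistinct1_alt (arr : List String) (k : Int) : String :=
  let s := arr.foldl kthAltStep (PySem.Dict.empty, PySem.Set.empty)
  let distinct := s.1.keys
  if 1 ≤ k ∧ k ≤ (distinct.length : Int) then distinct.getD (k - 1).toNat "" else ""

-- ===== PRECONDITION & SPEC =====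
def Spec_kthDistinct1 (arr : List String) (k : Int) (out : String) : Prop := out = kthDistinct1_alt arr k
instance (arr : List String) (k : Int) (out : String) : Decidable (Spec_kthDistinct1 arr k out) := by unfold Spec_kthDistinct1; infer_instance

-- ===== CLAIM (what is proved, stated in full; the proofs are below) =====
def Claim_equal_kthDistinct1 : Prop := ∀ (arr : List String) (k : Int), Dom_kthDistinct1 arr k → Spec_kthDistinct1 arr k (kthDistinct1 arr k)

-- ===== LEMMAS AND PROOFS =====

-- A's scan equals positional lookup in the filtered list.
theorem kthDistinct1Loop_eq (c : PySem.Dict String Int) :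
    ∀ (xs : List String) (k : Int),
      kthDistinct1Loop c xs k =
        if 1 ≤ k then (xs.filter (fun a => c.getD a 0 == 1)).getD (k - 1).toNat "" else "" := by
  intro xs
  induction xs with
  | nil =>
    intro k
    simp [kthDistinct1Loop, List.getD]
  | cons a t ih =>
    intro k
    by_cases hp : (c.getD a 0 == 1) = true
    · rw [kthDistinct1Loop, if_pos hp, List.filter_cons_of_pos (p := fun a => c.getD a 0 == 1) hp]
      by_cases hk1 : k - 1 = 0
      · have hk : k = 1 := by omega
        subst hk
        simp [List.getD]
      · rw [if_neg hk1, ih]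
        by_cases hk : 1 ≤ k
        · have hk3 : 1 ≤ k - 1 := by omega
          rw [if_pos hk3, if_pos hk]
          have h1 : (k - 1 - 1).toNat = (k - 1).toNat - 1 := by omega
          have h2 : (k - 1).toNat = ((k - 1).toNat - 1) + 1 := by omega
          rw [h1, h2]
          simp [List.getD]
        · have : ¬ 1 ≤ k - 1 := by omega
          rw [if_neg this, if_neg hk]
    · rw [kthDistinct1Loop, if_neg hp, List.filter_cons_of_neg (p := fun a => c.getD a 0 == 1) hp, ih]

-- Scanning arr for its count-1 strings equals scanning the deduplicated first-occurrence list: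
-- a count-1 string occurs exactly once in each.
theorem filter_once_dedup (q : String → Bool) :
    ∀ (xs : List String), (∀ a ∈ xs, q a = true → xs.count a = 1) →
      xs.filter q = (PySem.Set.ofList xs).filter q := by
  intro xs
  induction xs with
  | nil => intro _; simp [PySem.Set.ofList]
  | cons x t ih =>
    intro h
    rw [PySem.Set.ofList_cons]
    by_cases hq : q x = true
    · have hx : x ∉ t := by
        have := h x (by simp) hq
        simp at this
        exact fun hmem => by
          have : 1 ≤ t.count x := List.one_le_count_iff.mpr hmem
          omega
      have hdis : (PySem.Set.ofList t).discard x = PySem.Set.ofList t := by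
        apply List.filter_eq_self.mpr
        intro y hy
        have : y ∈ t := (PySem.Set.mem_ofList t y).mp hy
        have : y ≠ x := fun e => hx (e ▸ this)
        simp [this]
      rw [hdis, List.filter_cons_of_pos hq, List.filter_cons_of_pos hq, ih]
      intro a ha hqa
      have := h a (by simp [ha]) hqa
      have hax : a ≠ x := fun e => hx (e ▸ ha)
      rw [List.count_cons] at this
      simp [Ne.symm hax] at this
      exact this
    · have hq' : q x = false := by simpa using hq
      rw [List.filter_cons_of_neg hq, List.filter_cons_of_neg hq]
      have hcomm : ((PySem.Set.ofList t).discard x).filter q = (PySem.Set.ofList t).filter q := by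
        unfold PySem.Set.discard
        rw [List.filter_comm]
        apply List.filter_eq_self.mpr
        intro y hy
        have hqy : q y = true := List.of_mem_filter hy
        have : y ≠ x := fun e => by rw [e, hq'] at hqy; exact Bool.false_ne_true hqy
        simp [this]
      rw [hcomm, ih]
      intro a ha hqa
      have := h a (by simp [ha]) hqa
      have hax : a ≠ x := fun e => by rw [e, hq'] at hqa; exact Bool.false_ne_true hqa
      rw [List.count_cons] at this
      simp [Ne.symm hax] at this
      exact this

theorem kthAltStep_dup (s : PySem.Dict String (Option Unit) × PySem.Set String) (a : String)
    (h : PySem.Set.contains s.2 a = true) : kthAltStep s a = s := by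
  unfold kthAltStep; rw [if_pos h]

theorem kthAltStep_once (s : PySem.Dict String (Option Unit) × PySem.Set String) (a : String)
    (h : ¬ PySem.Set.contains s.2 a = true) (h2 : s.1.contains a = true) :
    kthAltStep s a = (s.1.erase a, PySem.Set.add s.2 a) := by
  unfold kthAltStep; rw [if_neg h, if_pos h2]

theorem kthAltStep_fresh (s : PySem.Dict String (Option Unit) × PySem.Set String) (a : String)
    (h : ¬ PySem.Set.contains s.2 a = true) (h2 : ¬ s.1.contains a = true) :
    kthAltStep s a = (s.1.insert a none, s.2) := by
  unfold kthAltStep; rw [if_neg h, if_neg h2]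

theorem kthAlt_fold_invariant :
    ∀ (p : List String),
      (p.foldl kthAltStep (PySem.Dict.empty, PySem.Set.empty)).1.items =
        ((PySem.Set.ofList p).filter (fun a => p.count a == 1)).map
          (fun a => (a, (none : Option Unit))) ∧
      ∀ a, a ∈ (p.foldl kthAltStep (PySem.Dict.empty, PySem.Set.empty)).2 ↔ 2 ≤ p.count a := by
  intro p
  induction p using List.reverseRecOn with
  | nil => simp [PySem.Set.ofList, PySem.Dict.empty, PySem.Set.empty]
  | append_singleton p x ih =>
    obtain ⟨h1, h2⟩ := ih
    rw [List.foldl_append]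
    simp only [List.foldl_cons, List.foldl_nil]
    set st := p.foldl kthAltStep (PySem.Dict.empty, PySem.Set.empty) with hst
    have hcount : ∀ a, (p ++ [x]).count a = p.count a + if x = a then 1 else 0 := by
      intro a; rw [List.count_append]
      rcases eq_or_ne x a with h|h
      · subst h; simp
      · simp [h]
    by_cases hdup : x ∈ st.2
    · -- x seen ≥ 2 times: state unchanged
      have hc2 : 2 ≤ p.count x := (h2 x).mp hdup
      have hxp : x ∈ p := List.count_pos_iff.mp (by omega)
      have hcont : PySem.Set.contains st.2 x = true := by
        simpa [PySem.Set.contains] using hdup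
      rw [kthAltStep_dup st x hcont]
      constructor
      · rw [h1]
        rw [PySem.Set.ofList_append_singleton, PySem.Set.add_of_mem (by simpa [PySem.Set.mem_ofList] using hxp)]
        congr 1
        apply List.filter_congr
        intro a ha
        have ha' : a ∈ p := (PySem.Set.mem_ofList p a).mp ha
        rw [hcount a]
        by_cases hax : x = a
        · subst hax
          rw [if_pos rfl, Bool.eq_iff_iff]
          simp; omega
        · simp [hax]
      · intro a
        rw [h2 a, hcount a]
        by_cases hax : x = a
        · subst hax
          rw [if_pos rfl]
          constructor <;> (intro h; omega)
        · simp [hax]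
    · by_cases honce : st.1.contains x = true
      · -- second sighting: evict
        have hcont : ¬ PySem.Set.contains st.2 x = true := by
          simpa [PySem.Set.contains] using hdup
        rw [kthAltStep_once st x hcont honce]
        have hkeys : st.1.keys = (PySem.Set.ofList p).filter (fun a => p.count a == 1) := by
          show st.1.items.map (·.1) = _
          rw [h1, List.map_map]
          have hid : ((fun q : String × Option Unit => q.1) ∘ fun a => (a, (none : Option Unit))) = id := rfl
          rw [hid, List.map_id]
        have hxkeys : x ∈ st.1.keys := by
          rw [PySem.Dict.contains_iff_mem_keys] at honce; exact honce
        rw [hkeys] at hxkeys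
        have hx1 : p.count x = 1 := by
          have := List.of_mem_filter hxkeys; simpa using this
        have hxp : x ∈ p := List.count_pos_iff.mp (by omega)
        constructor
        · show (st.1.erase x).items = _
          have herase : (st.1.erase x).items = st.1.items.filter (fun q => !(q.1 == x)) := by
            simp [PySem.Dict.erase]
          rw [herase, h1, List.filter_map]
          rw [PySem.Set.ofList_append_singleton, PySem.Set.add_of_mem (by simpa [PySem.Set.mem_ofList] using hxp)]
          have hcomp : ((fun q : String × Option Unit => !(q.1 == x)) ∘ (fun a => (a, (none : Option Unit)))) = fun a => !(a == x) := rfl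
          rw [hcomp]
          congr 1
          rw [List.filter_filter]
          apply List.filter_congr
          intro a ha
          have ha' : a ∈ p := (PySem.Set.mem_ofList p a).mp ha
          rw [hcount a]
          by_cases hax : x = a
          · subst hax; simp [hx1]
          · simp [hax]
            intro _ e
            exact hax e.symm
        · intro a
          rw [PySem.Set.mem_add, h2 a, hcount a]
          by_cases hax : x = a
          · subst hax
            rw [if_pos rfl]
            constructor
            · intro h; omega
            · intro _; right; rfl
          · rw [if_neg hax]
            constructor
            · intro h
              rcases h with h | h
              · exact h
              · exact absurd h.symm hax
            · intro h; left; exact h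
      · -- fresh string
        have hcont : ¬ PySem.Set.contains st.2 x = true := by
          simpa [PySem.Set.contains] using hdup
        rw [kthAltStep_fresh st x hcont honce]
        have hkeys : st.1.keys = (PySem.Set.ofList p).filter (fun a => p.count a == 1) := by
          show st.1.items.map (·.1) = _
          rw [h1, List.map_map]
          have hid : ((fun q : String × Option Unit => q.1) ∘ fun a => (a, (none : Option Unit))) = id := rfl
          rw [hid, List.map_id]
        have hxkeys : x ∉ st.1.keys := by
          rw [PySem.Dict.contains_iff_mem_keys] at honce; exact honce
        have hnot2 : ¬ 2 ≤ p.count x := fun h => hdup ((h2 x).mpr h)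
        have hx0 : p.count x = 0 := by
          by_contra h0
          have hx1 : p.count x = 1 := by omega
          apply hxkeys
          rw [hkeys]
          apply List.mem_filter.mpr
          exact ⟨(PySem.Set.mem_ofList p x).mpr (List.count_pos_iff.mp (by omega)), by simp [hx1]⟩
        have hxp : x ∉ p := by
          intro h
          have := List.one_le_count_iff.mpr h; omega
        constructor
        · show (st.1.insert x none).items = _
          rw [PySem.Dict.items_insert_of_not_contains (h := by simpa using honce), h1]
          rw [PySem.Set.ofList_append_singleton, PySem.Set.add_of_not_mem (by simpa [PySem.Set.mem_ofList] using hxp)]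
          rw [List.filter_append, List.map_append]
          congr 1
          · congr 1
            apply List.filter_congr
            intro a ha
            have ha' : a ∈ p := (PySem.Set.mem_ofList p a).mp ha
            rw [hcount a]
            have hax : x ≠ a := fun e => hxp (e ▸ ha')
            simp [hax]
          · simp [hx0]
        · intro a
          rw [h2 a, hcount a]
          by_cases hax : x = a
          · subst hax; simp [hx0]
          · simp [hax]

-- ===== VERDICT (by name: the statement is the Claim_ definition above) =====
theorem kthDistinct1_spec : Claim_equal_kthDistinct1 := by
  intro arr k _
  unfold Spec_kthDistinct1 kthDistinct1 kthDistinct1_alt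
  obtain ⟨h1, _⟩ := kthAlt_fold_invariant arr
  have hkeys : (arr.foldl kthAltStep (PySem.Dict.empty, PySem.Set.empty)).1.keys =
      (PySem.Set.ofList arr).filter (fun a => arr.count a == 1) := by
    show (arr.foldl kthAltStep (PySem.Dict.empty, PySem.Set.empty)).1.items.map (·.1) = _
    rw [h1, List.map_map]
    have hid : ((fun q : String × Option Unit => q.1) ∘ fun a => (a, (none : Option Unit))) = id := rfl
    rw [hid, List.map_id]
  rw [kthDistinct1Loop_eq]
  have hpred : (fun a => (PySem.Dict.counter arr).getD a 0 == 1) =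
      fun a => ((arr.count a : Int) == 1) := by
    funext a; rw [PySem.Dict.getD_counter]
  have hcast : (fun a => ((arr.count a : Int) == 1)) = fun a => (arr.count a == 1) := by
    funext a
    rcases Bool.eq_false_or_eq_true (arr.count a == 1) with h | h
    · have : arr.count a = 1 := by simpa using h
      simp [this]
    · have : arr.count a ≠ 1 := by simpa using h
      simp [this]
  have hF : arr.filter (fun a => (PySem.Dict.counter arr).getD a 0 == 1) =
      (arr.foldl kthAltStep (PySem.Dict.empty, PySem.Set.empty)).1.keys := by
    rw [hkeys, hpred, hcast]
    apply filter_once_dedup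
    intro a _ hqa
    simpa using hqa
  rw [hF]
  set F := (arr.foldl kthAltStep (PySem.Dict.empty, PySem.Set.empty)).1.keys with hFdef
  by_cases hk : 1 ≤ k
  · rw [if_pos hk]
    by_cases hle : k ≤ (F.length : Int)
    · rw [if_pos ⟨hk, hle⟩]
    · rw [if_neg (by intro h; exact hle h.2)]
      apply List.getD_eq_default
      omega
  · rw [if_neg hk, if_neg (by intro h; exact hk h.1)]
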